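-- pv_equiv track=rewrite | github.com/SkiveF/testech | katas/the_different.py | different
-- ===== SOURCE A (Python) =====
-- def different(N):
--     if N == 0:
--         return 0
--
--     sign = 1
--     if N < 0:
--         sign = -1
--         N = abs(N)
--
--     digits = [int(digit) for digit in str(N)]
--     result = digits[0] * 10 ** (len(digits) - 1) + 7 * (
--         10 ** (len(digits) - 2) if len(digits) > 1 else 0)
--     return result * sign
-- ===== SOURCE B (Python) =====
-- def different(N):
--     if N == 0:
--         return 0
--     sign = -1 if N < 0 else 1
--     n = abs(N)
--     m = 1
--     while n >= 10:
--         n //= 10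
--         m *= 10
--     return sign * (n * m + 7 * (m // 10))
-- ===== Notes on version B (the rewrite author's own statement) =====
-- stated objective: simpler
-- what changed: Replaces the str()/list-of-digits representation with a pure-arithmetic loop that repeatedly divides to find the leading digit and its magnitude, assembling the result directly from those two numbers.
import Mathlib
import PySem

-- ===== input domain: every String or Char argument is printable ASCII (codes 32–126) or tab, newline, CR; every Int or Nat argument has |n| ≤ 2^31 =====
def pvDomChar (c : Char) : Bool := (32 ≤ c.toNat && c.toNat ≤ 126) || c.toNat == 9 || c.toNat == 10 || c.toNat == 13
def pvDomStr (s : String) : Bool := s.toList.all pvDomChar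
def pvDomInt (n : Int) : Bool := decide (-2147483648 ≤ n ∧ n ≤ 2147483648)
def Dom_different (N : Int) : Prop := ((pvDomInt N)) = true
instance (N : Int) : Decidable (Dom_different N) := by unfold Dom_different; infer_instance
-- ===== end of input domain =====

-- B replaces A's str()/digit-list construction with a pure-arithmetic divide-by-10 loop; same values everywhere (objective: simpler).


-- ===== PORT A =====
-- int(digit) for a single character of str(N); the chars are always digits here, so the default is unused
def pyIntOfDigitChar (c : Char) : Int := (PySem.Int.ofChars? [c]).getD 0

def different (N : Int) : Int :=
  if N = 0 then 0
  else
    let sign : Int := if N < 0 then -1 else 1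
    let N' : Int := if N < 0 then |N| else N
    let digits : List Int := (PySem.Int.toChars N').map pyIntOfDigitChar
    let result : Int :=
      PySem.List.pyGetD digits 0 0 * 10 ^ (digits.length - 1) +
        7 * (if digits.length > 1 then (10 : Int) ^ (digits.length - 2) else 0)
    result * sign

-- ===== PORT B =====
-- the while-loop of Source B: divide n by 10 while n >= 10, multiplying m by 10
def altLoop (n m : Nat) : Nat × Nat :=
  if h : 10 ≤ n then altLoop (n / 10) (m * 10) else (n, m)
  decreasing_by exact Nat.div_lt_self (by omega) (by omega)

def different_alt (N : Int) : Int :=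
  if N = 0 then 0
  else
    let sign : Int := if N < 0 then -1 else 1
    let p := altLoop N.natAbs 1
    sign * ((p.1 : Int) * (p.2 : Int) + 7 * PySem.Int.floordiv (p.2 : Int) 10)

-- ===== PRECONDITION & SPEC =====
def Spec_different (N : Int) (out : Int) : Prop := out = different_alt N
instance (N : Int) (out : Int) : Decidable (Spec_different N out) := by unfold Spec_different; infer_instance

-- ===== CLAIM (what is proved, stated in full; the proofs are below) =====
def Claim_equal_different : Prop := ∀ (N : Int), Dom_different N → Spec_different N (different N)

-- ===== LEMMAS AND PROOFS =====

-- Nat.toDigitsCore with enough fuel produces the big-endian decimal digits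
lemma toDigitsCore_eq_digits (f : Nat) : ∀ (n : Nat) (l : List Char), 0 < n → n < f →
    Nat.toDigitsCore 10 f n l = ((Nat.digits 10 n).map Nat.digitChar).reverse ++ l := by
  induction f with
  | zero => intro n l h hf; omega
  | succ f ih =>
      intro n l h hf
      rw [Nat.digits_def' (by norm_num : 1 < 10) h]
      simp only [Nat.toDigitsCore, List.map_cons, List.reverse_cons, List.append_assoc,
        List.singleton_append]
      by_cases h10 : n / 10 = 0
      · rw [h10]
        simp [Nat.digits_zero]
      · rw [if_neg h10, ih (n / 10) _ (by omega) (by omega)]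

lemma toChars_of_pos (n : Int) (h : 0 < n) :
    PySem.Int.toChars n = ((Nat.digits 10 n.toNat).map Nat.digitChar).reverse := by
  have hn : ¬ n < 0 := by omega
  simp only [PySem.Int.toChars, if_neg hn, Nat.toDigits]
  rw [toDigitsCore_eq_digits (n.toNat + 1) n.toNat [] (by omega) (by omega)]
  simp

lemma pyIntOfDigitChar_digitChar (k : Nat) (h : k < 10) :
    pyIntOfDigitChar (Nat.digitChar k) = (k : Int) := by
  interval_cases k <;> decide

-- the last decimal digit in Nat.digits order is the leading digit n / 10^(log 10 n)
lemma digits_getLast? (m : Nat) (h : 0 < m) :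
    (Nat.digits 10 m).getLast? = some (m / 10 ^ Nat.log 10 m) := by
  induction m using Nat.strong_induction_on with
  | _ m ih =>
    rw [Nat.digits_def' (by norm_num : 1 < 10) h]
    by_cases h10 : m < 10
    · have hlog : Nat.log 10 m = 0 := Nat.log_eq_zero_iff.2 (Or.inl h10)
      have : m / 10 = 0 := by omega
      rw [this]
      simp [hlog, Nat.mod_eq_of_lt h10]
    · have hq : 0 < m / 10 := Nat.div_pos (by omega) (by norm_num)
      have hne : Nat.digits 10 (m / 10) ≠ [] := by
        rw [Nat.digits_def' (by norm_num : 1 < 10) hq]; simp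
      rw [Nat.digits_def' (by norm_num : 1 < 10) hq, List.getLast?_cons_cons,
        ← Nat.digits_def' (by norm_num : 1 < 10) hq,
        ih (m / 10) (Nat.div_lt_self h (by norm_num)) hq]
      have hlog : Nat.log 10 m = Nat.log 10 (m / 10) + 1 := by
        have := Nat.log_div_base 10 m
        have hpos : 0 < Nat.log 10 m := Nat.log_pos (by norm_num) (by omega)
        omega
      rw [hlog, Nat.div_div_eq_div_mul, pow_succ, Nat.mul_comm]

lemma altLoop_eq (n : Nat) : ∀ m : Nat, 0 < n →
    altLoop n m = (n / 10 ^ Nat.log 10 n, m * 10 ^ Nat.log 10 n) := by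
  induction n using Nat.strong_induction_on with
  | _ n ih =>
    intro m h
    rw [altLoop]
    by_cases h10 : 10 ≤ n
    · rw [dif_pos h10, ih (n / 10) (Nat.div_lt_self h (by norm_num)) (m * 10)
        (Nat.div_pos h10 (by norm_num))]
      have hlog : Nat.log 10 n = Nat.log 10 (n / 10) + 1 := by
        have := Nat.log_div_base 10 n
        have hpos : 0 < Nat.log 10 n := Nat.log_pos (by norm_num) (by omega)
        omega
      rw [hlog, Nat.div_div_eq_div_mul, pow_succ]
      simp [Nat.mul_comm, Nat.mul_assoc]
    · have hlog : Nat.log 10 n = 0 := Nat.log_eq_zero_iff.2 (Or.inl (by omega))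
      rw [dif_neg h10]
      simp [hlog]

-- ===== VERDICT (by name: the statement is the Claim_ definition above) =====
theorem different_spec : Claim_equal_different := by
  intro N _
  unfold Spec_different different different_alt
  by_cases h0 : N = 0
  · simp [h0]
  · rw [if_neg h0, if_neg h0]
    have hN' : (if N < 0 then |N| else N) = (N.natAbs : Int) := by
      by_cases hneg : N < 0
      · rw [if_pos hneg, abs_of_neg hneg]; omega
      · rw [if_neg hneg]; omega
    simp only [hN']
    set m : Nat := N.natAbs with hm
    have hmpos : 0 < m := by simp [hm]; omega
    have hpos : (0 : Int) < (m : Int) := by exact_mod_cast hmpos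
    set g : Nat := Nat.log 10 m with hg
    -- digit list facts
    rw [toChars_of_pos _ hpos]
    have htoNat : ((m : Int)).toNat = m := Int.toNat_natCast m
    rw [htoNat]
    set L : List Nat := Nat.digits 10 m with hL
    have hLlen : L.length = g + 1 := Nat.length_digits 10 m (by norm_num) (by omega)
    have hLlast : L.getLast? = some (m / 10 ^ g) := digits_getLast? m hmpos
    have hmap : (L.map Nat.digitChar).reverse.map pyIntOfDigitChar
        = (L.map (fun k => pyIntOfDigitChar (Nat.digitChar k))).reverse := by
      simp [List.map_reverse, List.map_map, Function.comp]
    rw [hmap]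
    have hlen : ((L.map (fun k => pyIntOfDigitChar (Nat.digitChar k))).reverse).length = g + 1 := by
      simp [hLlen]
    -- head of the digit list = leading digit
    have hlead : m / 10 ^ g < 10 := by
      have h1 : m < 10 ^ (g + 1) := Nat.lt_pow_succ_log_self (by norm_num) m
      have h2 : 10 ^ (g+1) = 10 ^ g * 10 := pow_succ 10 g
      exact Nat.div_lt_of_lt_mul (by omega)
    have hhead : ((L.map (fun k => pyIntOfDigitChar (Nat.digitChar k))).reverse).head?
        = some ((m / 10 ^ g : Nat) : Int) := by
      rw [List.head?_reverse, List.getLast?_map, hLlast]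
      simp [pyIntOfDigitChar_digitChar _ hlead]
    have hget : PySem.List.pyGetD ((L.map (fun k => pyIntOfDigitChar (Nat.digitChar k))).reverse) 0 0
        = ((m / 10 ^ g : Nat) : Int) := by
      rw [PySem.List.pyGetD_zero]
      cases hcons : (L.map (fun k => pyIntOfDigitChar (Nat.digitChar k))).reverse with
      | nil => rw [hcons] at hhead; simp at hhead
      | cons a t => rw [hcons] at hhead; simp at hhead; simp [hhead]
    rw [hget, hlen, altLoop_eq m 1 hmpos, ← hg]
    simp only [one_mul]
    have hfd : PySem.Int.floordiv ((10 ^ g : Nat) : Int) 10 = ((10 ^ g / 10 : Nat) : Int) :=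
      PySem.Int.floordiv_natCast (10 ^ g) 10
    simp only [hfd]
    have key : ((m / 10 ^ g : Nat) : Int) * 10 ^ (g + 1 - 1)
        + 7 * (if g + 1 > 1 then (10 : Int) ^ (g + 1 - 2) else 0)
        = ((m / 10 ^ g : Nat) : Int) * ((10 ^ g : Nat) : Int) + 7 * ((10 ^ g / 10 : Nat) : Int) := by
      cases g with
      | zero => norm_num
      | succ k =>
          have h1 : (10 : Nat) ^ (k + 1) / 10 = 10 ^ k := by
            rw [pow_succ]; exact Nat.mul_div_cancel _ (by norm_num)
          rw [h1]
          simp only [Nat.add_sub_cancel]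
          rw [if_pos (by omega)]
          push_cast
          ring
    rw [key]
    by_cases hneg : N < 0 <;> simp [hneg]
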